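-- pv_equiv track=rewrite | github.com/2inlee/Algorithm_solved | 파이썬알고리즘/DFS, BFS/송아지찾기.py | bfs
-- ===== SOURCE A (Python) =====
-- from collections import deque
--
-- def bfs(s, e):
--     visited = set()  # 방문한 위치를 기록할 집합
--     queue = deque([(s, 0)])  # 큐 초기화, (현재 위치, 점프 횟수)
--     while queue:
--         current, jumps = queue.popleft()
--         if current == e:
--             return jumps
--         for next_step in (current + 1, current - 1, current + 5):  # 가능한 모든 이동
--             if next_step not in visited:
--                 visited.add(next_step)
--                 queue.append((next_step, jumps + 1))
-- ===== SOURCE B (Python) =====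
-- def bfs(s, e):
--     # minimal number of moves from s to e with steps +1, -1, +5, in closed form
--     d = e - s
--     if d < 0:
--         return -d
--     c = d // 5
--     return min(d - 4 * c, 6 * (c + 1) - d)
-- ===== Notes on version B (the rewrite author's own statement) =====
-- stated objective: faster
-- what changed: Replaces the breadth-first search over positions (queue + visited set) by an O(1) closed form: with d = e - s, the answer is -d for d < 0 and otherwise min over taking floor(d/5) or floor(d/5)+1 five-jumps, i.e. min(d - 4*(d//5), 6*(d//5 + 1) - d).
import Mathlib
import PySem

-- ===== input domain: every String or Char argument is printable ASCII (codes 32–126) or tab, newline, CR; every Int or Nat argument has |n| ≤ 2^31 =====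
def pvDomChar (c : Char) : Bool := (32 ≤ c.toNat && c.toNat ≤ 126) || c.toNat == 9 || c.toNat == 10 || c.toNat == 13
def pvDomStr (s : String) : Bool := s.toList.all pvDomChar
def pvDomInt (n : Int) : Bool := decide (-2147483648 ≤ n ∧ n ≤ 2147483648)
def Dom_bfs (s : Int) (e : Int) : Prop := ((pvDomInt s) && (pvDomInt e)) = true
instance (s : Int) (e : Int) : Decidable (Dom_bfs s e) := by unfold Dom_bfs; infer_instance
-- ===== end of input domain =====

-- B replaces A's breadth-first search by an O(1) closed form for the minimal number of
-- +1/-1/+5 moves (objective: faster).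

-- ===== PORT A =====
-- Literal port of A's BFS loop, step for step.  Python's deque is modeled by a
-- front/back list pair (identical pop/append order) and its hash set by Std.HashSet
-- (the set is only ever tested for membership and inserted into, so this is
-- observationally identical); the Nat fuel only totalizes the 'while queue:' loop —
-- it is proved sufficient below, so the 0 returned at fuel exhaustion / empty queue
-- is never reached.
def bfsLoop (e : Int) (fuel : Nat) (front back : List (Int × Int))
    (visited : Std.HashSet Int) : Int :=
  match fuel, front, back with
  | 0, _, _ => 0
  | _ + 1, [], [] => 0
  | f + 1, [], b :: bs =>
    match (b :: bs).reverse with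
    | [] => 0
    | (current, jumps) :: rest =>
      if current = e then jumps
      else
        let st := [current + 1, current - 1, current + 5].foldl
          (fun (acc : List (Int × Int) × Std.HashSet Int) next_step =>
            if next_step ∈ acc.2 then acc
            else ((next_step, jumps + 1) :: acc.1, acc.2.insert next_step))
          ([], visited)
        bfsLoop e f rest st.1 st.2
  | f + 1, (current, jumps) :: rest, back =>
    if current = e then jumps
    else
      let st := [current + 1, current - 1, current + 5].foldl
        (fun (acc : List (Int × Int) × Std.HashSet Int) next_step =>
          if next_step ∈ acc.2 then acc
          else ((next_step, jumps + 1) :: acc.1, acc.2.insert next_step))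
        (back, visited)
      bfsLoop e f rest st.1 st.2

def bfs (s : Int) (e : Int) : Int :=
  bfsLoop e (4 ^ ((e - s).natAbs + 2)) [(s, 0)] [] ∅

-- ===== PORT B =====
def bfs_alt (s : Int) (e : Int) : Int :=
  let d := e - s
  if d < 0 then -d
  else
    let c := PySem.Int.floordiv d 5
    min (d - 4 * c) (6 * (c + 1) - d)

-- ===== PRECONDITION & SPEC =====
def Spec_bfs (s : Int) (e : Int) (out : Int) : Prop := out = bfs_alt s e
instance (s : Int) (e : Int) (out : Int) : Decidable (Spec_bfs s e out) := by unfold Spec_bfs; infer_instance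

-- ===== CLAIM (what is proved, stated in full; the proofs are below) =====
def Claim_equal_bfs : Prop := ∀ (s : Int) (e : Int), Dom_bfs s e → Spec_bfs s e (bfs s e)

-- ===== LEMMAS AND PROOFS =====

-- Closed-form distance, in a proof-friendly shape: gG d = minimal number of +1/-1/+5
-- steps summing to d.
def gG (d : Int) : Int := if d < 0 then -d else d / 5 + min (d % 5) (6 - d % 5)

lemma gG_nonneg (d : Int) : 0 ≤ gG d := by simp only [gG]; split_ifs <;> omega

lemma gG_eq_zero (d : Int) : gG d = 0 ↔ d = 0 := by simp only [gG]; split_ifs <;> omega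

lemma gG_eq_one (d : Int) : gG d = 1 ↔ d = 1 ∨ d = -1 ∨ d = 5 := by
  simp only [gG]; split_ifs <;> omega

lemma gG_lip1 (d : Int) : gG (d + 1) ≤ gG d + 1 := by simp only [gG]; split_ifs <;> omega

lemma gG_lipm1 (d : Int) : gG (d - 1) ≤ gG d + 1 := by simp only [gG]; split_ifs <;> omega

lemma gG_lip5 (d : Int) : gG (d + 5) ≤ gG d + 1 := by simp only [gG]; split_ifs <;> omega

lemma gG_le_natAbs (d : Int) : gG d ≤ (d.natAbs : Int) := by
  simp only [gG]; split_ifs <;> omega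

lemma gG_pred (d : Int) (h : 2 ≤ gG d) :
    ∃ m : Int, (m = 1 ∨ m = -1 ∨ m = 5) ∧ gG (d - m) = gG d - 1 := by
  by_cases hneg : d < 0
  · exact ⟨-1, by norm_num, by simp only [gG]; split_ifs <;> omega⟩
  · by_cases h4 : d ≤ 4
    · by_cases h3 : d = 4
      · exact ⟨5, by norm_num, by simp only [gG] at *; split_ifs at * <;> omega⟩
      · exact ⟨1, by norm_num, by simp only [gG] at *; split_ifs at * <;> omega⟩
    · exact ⟨5, by norm_num, by simp only [gG]; split_ifs <;> omega⟩

lemma bfs_alt_eq (s e : Int) : bfs_alt s e = gG (e - s) := by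
  simp only [bfs_alt]
  rw [PySem.Int.floordiv_eq_ediv_of_pos (by norm_num)]
  simp only [gG]; split_ifs <;> omega

lemma memInsert (V : Std.HashSet Int) (x m : Int) : x ∈ V.insert m ↔ x ∈ V ∨ x = m := by
  simp [Std.HashSet.mem_insert]; tauto

-- Abstract single-list form of A's loop (queue = front ++ back.reverse); the invariant
-- proofs are carried out on this form and transported to the deque form by bfsLoop_eq_abs.
def bfsAbs (e : Int) (fuel : Nat) (queue : List (Int × Int)) (visited : Std.HashSet Int) : Int :=
  match fuel, queue with
  | 0, _ => 0
  | _ + 1, [] => 0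
  | f + 1, (current, jumps) :: rest =>
    if current = e then jumps
    else
      let st := [current + 1, current - 1, current + 5].foldl
        (fun (acc : List (Int × Int) × Std.HashSet Int) next_step =>
          if next_step ∈ acc.2 then acc
          else (acc.1 ++ [(next_step, jumps + 1)], acc.2.insert next_step))
        (rest, visited)
      bfsAbs e f st.1 st.2

-- The body of the inner 'for next_step' loop, abstracted over the current jump count:
-- abstract (append-at-end) form and deque (push-on-back) form.
def stepF (j : Int) : (List (Int × Int) × Std.HashSet Int) → Int → (List (Int × Int) × Std.HashSet Int) :=
  fun acc next_step =>
    if next_step ∈ acc.2 then acc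
    else (acc.1 ++ [(next_step, j + 1)], acc.2.insert next_step)

def stepD (j : Int) : (List (Int × Int) × Std.HashSet Int) → Int → (List (Int × Int) × Std.HashSet Int) :=
  fun acc next_step =>
    if next_step ∈ acc.2 then acc
    else ((next_step, j + 1) :: acc.1, acc.2.insert next_step)

lemma bfsAbs_succ_cons (e : Int) (f : Nat) (c j : Int) (rest : List (Int × Int))
    (V : Std.HashSet Int) :
    bfsAbs e (f + 1) ((c, j) :: rest) V =
      if c = e then j
      else bfsAbs e f (([c + 1, c - 1, c + 5].foldl (stepF j) (rest, V)).1)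
                      (([c + 1, c - 1, c + 5].foldl (stepF j) (rest, V)).2) := rfl

lemma bfsLoop_cons (e : Int) (f : Nat) (c j : Int) (rest back : List (Int × Int))
    (V : Std.HashSet Int) :
    bfsLoop e (f + 1) ((c, j) :: rest) back V =
      if c = e then j
      else bfsLoop e f rest (([c + 1, c - 1, c + 5].foldl (stepD j) (back, V)).1)
                            (([c + 1, c - 1, c + 5].foldl (stepD j) (back, V)).2) := rfl

lemma bfsLoop_flip (e : Int) (f : Nat) (b : Int × Int) (bs : List (Int × Int))
    (V : Std.HashSet Int) :
    bfsLoop e (f + 1) [] (b :: bs) V = bfsLoop e (f + 1) ((b :: bs).reverse) [] V := by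
  obtain ⟨c, j, rest, hrev⟩ :
      ∃ c j rest, ((b :: bs).reverse : List (Int × Int)) = (c, j) :: rest := by
    cases hr : ((b :: bs).reverse : List (Int × Int)) with
    | nil => exact absurd hr (by simp)
    | cons hd tl => obtain ⟨c', j'⟩ := hd; exact ⟨c', j', tl, rfl⟩
  simp only [bfsLoop, hrev]

-- One inner pass in the deque form and in the abstract form produce the same queue
-- (through the abstraction front ++ back.reverse) and the same visited set.
lemma foldRel (j : Int) (ms : List Int) : ∀ (q back : List (Int × Int)) (V : Std.HashSet Int),
    q ++ (ms.foldl (stepD j) (back, V)).1.reverse = (ms.foldl (stepF j) (q ++ back.reverse, V)).1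
    ∧ (ms.foldl (stepD j) (back, V)).2 = (ms.foldl (stepF j) (q ++ back.reverse, V)).2 := by
  induction ms with
  | nil => intro q back V; exact ⟨rfl, rfl⟩
  | cons m ms ih =>
    intro q back V
    by_cases hm : m ∈ V
    · have h1 : stepD j (back, V) m = (back, V) := by simp [stepD, hm]
      have h2 : stepF j (q ++ back.reverse, V) m = (q ++ back.reverse, V) := by simp [stepF, hm]
      rw [List.foldl_cons, List.foldl_cons, h1, h2]
      exact ih q back V
    · have h1 : stepD j (back, V) m = ((m, j + 1) :: back, V.insert m) := by simp [stepD, hm]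
      have h2 : stepF j (q ++ back.reverse, V) m
          = (q ++ ((m, j + 1) :: back).reverse, V.insert m) := by
        simp [stepF, hm, List.reverse_cons, List.append_assoc]
      rw [List.foldl_cons, List.foldl_cons, h1, h2]
      exact ih q ((m, j + 1) :: back) (V.insert m)

lemma bfsLoop_eq_abs (e : Int) :
    ∀ (fuel : Nat) (front back : List (Int × Int)) (V : Std.HashSet Int),
    bfsLoop e fuel front back V = bfsAbs e fuel (front ++ back.reverse) V := by
  intro fuel
  induction fuel with
  | zero => intro front back V; rfl
  | succ f ih =>
    intro front back V
    match front, back with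
    | [], [] => rfl
    | [], b :: bs =>
      rw [bfsLoop_flip]
      obtain ⟨c, j, rest, hrev⟩ :
          ∃ c j rest, ((b :: bs).reverse : List (Int × Int)) = (c, j) :: rest := by
        cases hr : ((b :: bs).reverse : List (Int × Int)) with
        | nil => exact absurd hr (by simp)
        | cons hd tl => obtain ⟨c', j'⟩ := hd; exact ⟨c', j', tl, rfl⟩
      rw [List.nil_append, hrev, bfsLoop_cons, bfsAbs_succ_cons]
      by_cases hce : c = e
      · rw [if_pos hce, if_pos hce]
      · rw [if_neg hce, if_neg hce]
        have hF := foldRel j [c + 1, c - 1, c + 5] rest [] V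
        simp only [List.reverse_nil, List.append_nil] at hF
        rw [ih, hF.1, hF.2]
    | (c, j) :: rest, back =>
      rw [bfsLoop_cons, List.cons_append, bfsAbs_succ_cons]
      by_cases hce : c = e
      · rw [if_pos hce, if_pos hce]
      · rw [if_neg hce, if_neg hce]
        have hF := foldRel j [c + 1, c - 1, c + 5] rest back V
        rw [ih, hF.1, hF.2]

-- Effect of one inner loop pass: only appends fresh entries and records them as visited.
lemma foldSpec (j : Int) (ms : List Int) : ∀ (q : List (Int × Int)) (V : Std.HashSet Int),
    ∃ (added : List Int) (V' : Std.HashSet Int),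
      ms.foldl (stepF j) (q, V) = (q ++ added.map (fun x => (x, j + 1)), V') ∧
      (∀ x : Int, x ∈ V' ↔ x ∈ V ∨ x ∈ added) ∧
      (∀ x ∈ added, x ∈ ms) ∧
      (∀ x ∈ ms, x ∈ V') ∧
      added.length ≤ ms.length := by
  induction ms with
  | nil =>
    intro q V
    exact ⟨[], V, by simp, by simp, by simp, by simp, by simp⟩
  | cons m ms ih =>
    intro q V
    by_cases hm : m ∈ V
    · obtain ⟨ad, V', he, hiff, hsub, hall, hlen⟩ := ih q V
      have hstep : stepF j (q, V) m = (q, V) := by simp [stepF, hm]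
      refine ⟨ad, V', by rw [List.foldl_cons, hstep]; exact he, hiff, ?_, ?_, by simpa using Nat.le_succ_of_le hlen⟩
      · intro x hx; exact List.mem_cons_of_mem _ (hsub x hx)
      · intro x hx
        rcases List.mem_cons.mp hx with rfl | hx
        · exact (hiff x).mpr (Or.inl hm)
        · exact hall x hx
    · obtain ⟨ad, V', he, hiff, hsub, hall, hlen⟩ := ih (q ++ [(m, j + 1)]) (V.insert m)
      have hstep : stepF j (q, V) m = (q ++ [(m, j + 1)], V.insert m) := by
        simp [stepF, hm]
      refine ⟨m :: ad, V', ?_, ?_, ?_, ?_, by simpa using hlen⟩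
      · rw [List.foldl_cons, hstep, he]
        simp [List.append_assoc]
      · intro x
        rw [hiff x, memInsert]
        simp only [List.mem_cons]
        tauto
      · intro x hx
        rcases List.mem_cons.mp hx with rfl | hx
        · exact List.mem_cons_self ..
        · exact List.mem_cons_of_mem _ (hsub x hx)
      · intro x hx
        rcases List.mem_cons.mp hx with rfl | hx
        · exact (hiff x).mpr (Or.inl (by rw [memInsert]; exact Or.inr rfl))
        · exact hall x hx

-- The BFS invariant, at processing level t: F = still-unprocessed entries of level t,
-- G = entries already enqueued for level t+1, V = the visited set.
def BfsInv (s e t : Int) (F G : List (Int × Int)) (V : Std.HashSet Int) : Prop :=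
  (∀ pj ∈ F, (pj : Int × Int).2 = t) ∧
  (∀ pj ∈ G, (pj : Int × Int).2 = t + 1) ∧
  (∀ pj ∈ F ++ G, gG ((pj : Int × Int).1 - s) ≤ pj.2) ∧
  (∀ x : Int, x ≠ s → gG (x - s) ≤ t + 1 →
      x ∈ V ∨ ∃ pj ∈ F, x = (pj : Int × Int).1 + 1 ∨ x = pj.1 - 1 ∨ x = pj.1 + 5) ∧
  (∀ y ∈ V, (∃ j : Int, (y, j) ∈ F ++ G) ∨
      ((y : Int) + 1 ∈ V ∧ y - 1 ∈ V ∧ y + 5 ∈ V ∧ gG (y - s) ≤ t)) ∧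
  (e ∈ V → ∃ j : Int, (e, j) ∈ F ++ G)

-- Final level: once (e, D) sits in the level-D part of the queue, the loop returns D.
lemma phase2 (e D : Int) (F : List (Int × Int)) :
    ∀ (G : List (Int × Int)) (V : Std.HashSet Int) (fuel : Nat),
      (e, D) ∈ F → (∀ pj ∈ F, (pj : Int × Int).2 = D) → F.length ≤ fuel →
      bfsAbs e fuel (F ++ G) V = D := by
  induction F with
  | nil => intro G V fuel h _ _; simp at h
  | cons hd F' ih =>
    intro G V fuel hmem hjs hfl
    obtain ⟨p0, j0⟩ := hd
    have hj0 : j0 = D := hjs (p0, j0) (by simp)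
    obtain ⟨f, rfl⟩ : ∃ f, fuel = f + 1 := ⟨fuel - 1, by simp at hfl; omega⟩
    rw [List.cons_append, bfsAbs_succ_cons]
    by_cases hpe : p0 = e
    · rw [if_pos hpe]; exact hj0
    · rw [if_neg hpe]
      have hmem' : (e, D) ∈ F' := by
        rcases List.mem_cons.mp hmem with h | h
        · exact absurd (congrArg Prod.fst h).symm hpe
        · exact h
      obtain ⟨ad, V', hfold, -, -, -, -⟩ := foldSpec j0 [p0 + 1, p0 - 1, p0 + 5] (F' ++ G) V
      rw [hfold]
      dsimp only
      rw [List.append_assoc]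
      exact ih (G ++ ad.map (fun x => (x, j0 + 1))) V' f hmem'
        (fun pj h => hjs pj (List.mem_cons_of_mem _ h)) (by simp at hfl ⊢; omega)

-- Levels before the last: the invariant is maintained and the fuel bound
-- Φ(t,F,G) = |F| + (|G| + 3|F| + 1)·4^(D-t) suffices to reach level D.
lemma phase1 (s e D : Int) (hgD : gG (e - s) = D) :
    ∀ n fuel : Nat, ∀ t : Int, ∀ F G : List (Int × Int), ∀ V : Std.HashSet Int,
      n = (D - t).toNat + fuel → 1 ≤ t → t + 1 ≤ D → BfsInv s e t F G V →
      F.length + (G.length + 3 * F.length + 1) * 4 ^ (D - t).toNat ≤ fuel →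
      bfsAbs e fuel (F ++ G) V = D := by
  intro n
  induction n using Nat.strong_induction_on with
  | _ n IH =>
    intro fuel t F G V hn ht1 htD hinv hfuel
    obtain ⟨hF, hG, hlow, hcomp, hproc, he⟩ := hinv
    have hP1 : 0 < 4 ^ (D - t).toNat := pow_pos (by norm_num) _
    match F with
    | [] =>
      match G with
      | [] =>
        exfalso
        have hx : (s - (t + 1)) ≠ s := by omega
        have hval : (s - (t + 1)) - s = -(t + 1) := by ring
        have hgx : gG ((s - (t + 1)) - s) = t + 1 := by
          rw [hval]; simp only [gG]; split_ifs <;> omega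
        rcases hcomp _ hx (le_of_eq hgx) with hv | ⟨pj, hpj, -⟩
        · rcases hproc _ hv with ⟨j, hj⟩ | ⟨-, -, -, hle⟩
          · simp at hj
          · omega
        · simp at hpj
      | g0 :: G' =>
        rw [List.nil_append]
        by_cases hstep : t + 1 = D
        · -- hand off to the final level
          have hne : e ≠ s := by
            intro h
            rw [h, sub_self] at hgD
            have : gG 0 = 0 := by decide
            omega
          have heV : e ∈ V := by
            rcases hcomp e hne (by omega) with hv | ⟨pj, hpj, -⟩
            · exact hv
            · simp at hpj
          obtain ⟨j, hj⟩ := he heV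
          rw [List.nil_append] at hj
          have hjD : j = D := by have := hG _ hj; simpa [hstep] using this
          rw [← List.append_nil (g0 :: G')]
          refine phase2 e D (g0 :: G') [] V fuel (hjD ▸ hj)
            (fun pj h => by have := hG pj h; omega) ?_
          have hb : (g0 :: G').length + 1 ≤ ((g0 :: G').length + 1) * 4 ^ (D - t).toNat :=
            Nat.le_mul_of_pos_right _ hP1
          simp only [List.length_nil, Nat.mul_zero, Nat.zero_add, Nat.add_zero] at hfuel
          omega
        · -- move to level t+1
          have hE : (D - t).toNat = (D - (t + 1)).toNat + 1 := by omega
          rw [← List.append_nil (g0 :: G')]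
          refine IH ((D - (t + 1)).toNat + fuel) (by omega) fuel (t + 1) (g0 :: G') [] V rfl
            (by omega) (by omega) ⟨?_, by simp, ?_, ?_, ?_, ?_⟩ ?_
          · exact hG
          · intro pj h
            rw [List.append_nil] at h
            exact hlow pj (by simpa using h)
          · intro x hx hle
            by_cases hle1 : gG (x - s) ≤ t + 1
            · rcases hcomp x hx hle1 with hv | ⟨pj, hpj, -⟩
              · exact Or.inl hv
              · simp at hpj
            · have h2 : 2 ≤ gG (x - s) := by
                have := gG_nonneg (x - s); omega
              obtain ⟨m, hm, hgm⟩ := gG_pred (x - s) h2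
              have hy : (x - m) ≠ s := by
                intro h
                have hz : (x - s) - m = 0 := by omega
                rw [hz] at hgm
                have : gG 0 = 0 := by decide
                omega
              have hrw : (x - m) - s = (x - s) - m := by ring
              have hyV : (x - m) ∈ V := by
                rcases hcomp (x - m) hy (by rw [hrw]; omega) with hv | ⟨pj, hpj, -⟩
                · exact hv
                · simp at hpj
              rcases hproc _ hyV with ⟨j, hj⟩ | ⟨-, -, -, hle'⟩
              · rw [List.nil_append] at hj
                refine Or.inr ⟨(x - m, j), hj, ?_⟩
                rcases hm with rfl | rfl | rfl
                · exact Or.inl (by omega)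
                · exact Or.inr (Or.inl (by omega))
                · exact Or.inr (Or.inr (by omega))
              · rw [hrw] at hle'
                omega
          · intro y hy
            rcases hproc y hy with ⟨j, hj⟩ | ⟨h1, h2, h3, h4⟩
            · exact Or.inl ⟨j, by simpa using hj⟩
            · exact Or.inr ⟨h1, h2, h3, by omega⟩
          · intro heV
            obtain ⟨j, hj⟩ := he heV
            exact ⟨j, by simpa using hj⟩
          · -- fuel bound across the level change
            set b := (g0 :: G').length with hb
            set Q := 4 ^ (D - (t + 1)).toNat with hQ
            have hQ1 : 0 < Q := pow_pos (by norm_num) _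
            have h4 : 4 ^ (D - t).toNat = Q * 4 := by rw [hE, pow_succ]
            rw [h4] at hfuel
            simp only [List.length_nil] at hfuel ⊢
            nlinarith [hfuel, hQ1]
    | (p0, j0) :: F' =>
      have hj0 : j0 = t := hF (p0, j0) (by simp)
      subst hj0
      have hflen : 1 ≤ fuel := by
        simp only [List.length_cons] at hfuel
        have : 0 < (G.length + 3 * (F'.length + 1) + 1) * 4 ^ (D - j0).toNat :=
          Nat.mul_pos (by omega) hP1
        omega
      obtain ⟨f, rfl⟩ : ∃ f, fuel = f + 1 := ⟨fuel - 1, by omega⟩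
      have hp0 : gG (p0 - s) ≤ j0 := by
        have := hlow (p0, j0) (by simp); simpa using this
      have hp0e : p0 ≠ e := by
        intro h; rw [h] at hp0; omega
      rw [List.cons_append, bfsAbs_succ_cons, if_neg hp0e]
      obtain ⟨ad, V', hfold, hiff, hsubms, hallms, hlen⟩ :=
        foldSpec j0 [p0 + 1, p0 - 1, p0 + 5] (F' ++ G) V
      rw [hfold]
      dsimp only
      rw [List.append_assoc]
      refine IH ((D - j0).toNat + f) (by omega) f j0 F'
        (G ++ ad.map (fun x => (x, j0 + 1))) V' rfl ht1 htD
        ⟨?_, ?_, ?_, ?_, ?_, ?_⟩ ?_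
      · exact fun pj h => hF pj (List.mem_cons_of_mem _ h)
      · intro pj h
        rcases List.mem_append.mp h with h | h
        · exact hG pj h
        · obtain ⟨x, hx, rfl⟩ := List.mem_map.mp h
          rfl
      · intro pj h
        rcases List.mem_append.mp h with h | h
        · exact hlow pj (List.mem_cons_of_mem _ (List.mem_append_left _ h))
        · rcases List.mem_append.mp h with h | h
          · exact hlow pj (List.mem_cons_of_mem _ (List.mem_append_right _ h))
          · obtain ⟨x, hx, rfl⟩ := List.mem_map.mp h
            have hx3 := hsubms x hx
            simp only [List.mem_cons] at hx3
            rcases hx3 with rfl | rfl | hx3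
            · have := gG_lip1 (p0 - s)
              have hr : p0 + 1 - s = (p0 - s) + 1 := by ring
              simp only [hr]; omega
            · have := gG_lipm1 (p0 - s)
              have hr : p0 - 1 - s = (p0 - s) - 1 := by ring
              simp only [hr]; omega
            · simp at hx3
              subst hx3
              have := gG_lip5 (p0 - s)
              have hr : p0 + 5 - s = (p0 - s) + 5 := by ring
              simp only [hr]; omega
      · intro x hx hle
        rcases hcomp x hx hle with hv | ⟨pj, hpj, hnb⟩
        · exact Or.inl ((hiff x).mpr (Or.inl hv))
        · rcases List.mem_cons.mp hpj with rfl | hpj'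
          · refine Or.inl (hallms x ?_)
            simpa using hnb
          · exact Or.inr ⟨pj, hpj', hnb⟩
      · intro y hyV'
        rcases (hiff y).mp hyV' with hyV | hyad
        · rcases hproc y hyV with ⟨j, hj⟩ | ⟨h1, h2, h3, h4⟩
          · rcases List.mem_append.mp hj with hj | hj
            · rcases List.mem_cons.mp hj with hjj | hj
              · have hy : y = p0 := congrArg Prod.fst hjj
                subst hy
                refine Or.inr ⟨hallms _ (by simp), hallms _ (by simp), hallms _ (by simp), hp0⟩
              · exact Or.inl ⟨j, List.mem_append_left _ hj⟩
            · exact Or.inl ⟨j, List.mem_append_right _ (List.mem_append_left _ hj)⟩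
          · exact Or.inr ⟨(hiff _).mpr (Or.inl h1), (hiff _).mpr (Or.inl h2),
              (hiff _).mpr (Or.inl h3), h4⟩
        · refine Or.inl ⟨j0 + 1, List.mem_append_right _ (List.mem_append_right _ ?_)⟩
          exact List.mem_map.mpr ⟨y, hyad, rfl⟩
      · intro heV'
        rcases (hiff e).mp heV' with heV | head
        · obtain ⟨j, hj⟩ := he heV
          rcases List.mem_append.mp hj with hj | hj
          · rcases List.mem_cons.mp hj with hjj | hj
            · exact absurd (congrArg Prod.fst hjj).symm hp0e
            · exact ⟨j, List.mem_append_left _ hj⟩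
          · exact ⟨j, List.mem_append_right _ (List.mem_append_left _ hj)⟩
        · exact ⟨j0 + 1, List.mem_append_right _ (List.mem_append_right _
            (List.mem_map.mpr ⟨e, head, rfl⟩))⟩
      · -- fuel bound after one pop
        have hlen3 : ad.length ≤ 3 := by simpa using hlen
        simp only [List.length_cons, List.length_append, List.length_map] at hfuel ⊢
        set P := 4 ^ (D - j0).toNat with hP
        have hXY : G.length + ad.length + 3 * F'.length + 1
            ≤ G.length + 3 * (F'.length + 1) + 1 := by omega
        have := Nat.mul_le_mul_right P hXY
        omega

lemma memV3 (s x : Int) :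
    x ∈ (((∅ : Std.HashSet Int).insert (s + 1)).insert (s - 1)).insert (s + 5)
      ↔ (x = s + 1 ∨ x = s - 1 ∨ x = s + 5) := by
  rw [memInsert, memInsert, memInsert]
  simp only [Std.HashSet.not_mem_empty, false_or]
  tauto

lemma bfs_eq_gG (s e : Int) : bfs s e = gG (e - s) := by
  unfold bfs
  rw [bfsLoop_eq_abs]
  simp only [List.reverse_nil, List.append_nil]
  have hN : 0 < 4 ^ ((e - s).natAbs + 2) := pow_pos (by norm_num) _
  obtain ⟨f, hf⟩ : ∃ f, 4 ^ ((e - s).natAbs + 2) = f + 1 :=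
    ⟨4 ^ ((e - s).natAbs + 2) - 1, by omega⟩
  rw [hf, bfsAbs_succ_cons]
  by_cases hse : s = e
  · rw [if_pos hse]
    subst hse
    simp only [sub_self]
    decide
  · rw [if_neg hse]
    -- the first pop: expand the initial inner loop concretely
    have hm2 : ¬ ((s - 1 : Int) ∈ ((∅ : Std.HashSet Int).insert (s + 1))) := by
      rw [memInsert]
      simp
      omega
    have hm3 : ¬ ((s + 5 : Int) ∈ (((∅ : Std.HashSet Int).insert (s + 1)).insert (s - 1))) := by
      rw [memInsert, memInsert]
      simp
      omega
    have h1 : stepF 0 (([] : List (Int × Int)), (∅ : Std.HashSet Int)) (s + 1)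
        = ([(s + 1, 1)], (∅ : Std.HashSet Int).insert (s + 1)) := by
      rw [stepF, if_neg (by simp)]
      rfl
    have h2 : stepF 0 ([(s + 1, 1)], (∅ : Std.HashSet Int).insert (s + 1)) (s - 1)
        = ([(s + 1, 1), (s - 1, 1)], ((∅ : Std.HashSet Int).insert (s + 1)).insert (s - 1)) := by
      rw [stepF, if_neg hm2]
      rfl
    have h3 : stepF 0 ([(s + 1, 1), (s - 1, 1)],
          ((∅ : Std.HashSet Int).insert (s + 1)).insert (s - 1)) (s + 5)
        = ([(s + 1, 1), (s - 1, 1), (s + 5, 1)],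
           (((∅ : Std.HashSet Int).insert (s + 1)).insert (s - 1)).insert (s + 5)) := by
      rw [stepF, if_neg hm3]
      rfl
    have hfold : [s + 1, s - 1, s + 5].foldl (stepF 0) ([], (∅ : Std.HashSet Int))
        = ([(s + 1, 1), (s - 1, 1), (s + 5, 1)],
           (((∅ : Std.HashSet Int).insert (s + 1)).insert (s - 1)).insert (s + 5)) := by
      rw [List.foldl_cons, h1, List.foldl_cons, h2, List.foldl_cons, h3, List.foldl_nil]
    have hmemV := memV3 s
    rw [hfold]
    dsimp only
    have hD0 : gG (e - s) ≠ 0 := by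
      rw [Ne, gG_eq_zero]; omega
    have hD1 : 1 ≤ gG (e - s) := by have := gG_nonneg (e - s); omega
    have hfit : ∀ x : Int, (x = 1 ∨ x = -1 ∨ x = 5) →
        (e - s = x) → (e, gG (e - s)) ∈ [(s + 1, (1:Int)), (s - 1, 1), (s + 5, 1)] := by
      intro x hx hex
      have hg1 : gG (e - s) = 1 := (gG_eq_one _).mpr (by omega)
      rcases hx with rfl | rfl | rfl
      · simp only [List.mem_cons]
        exact Or.inl (by rw [hg1]; exact Prod.ext (by omega) rfl)
      · simp only [List.mem_cons]
        exact Or.inr (Or.inl (by rw [hg1]; exact Prod.ext (by omega) rfl))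
      · simp only [List.mem_cons]
        exact Or.inr (Or.inr (Or.inl (by rw [hg1]; exact Prod.ext (by omega) rfl)))
    have hA : gG (e - s) ≤ ((e - s).natAbs : Int) := gG_le_natAbs _
    have hpow : 4 ^ 2 ≤ 4 ^ ((e - s).natAbs + 2) :=
      Nat.pow_le_pow_right (by norm_num) (by omega)
    by_cases hD : gG (e - s) = 1
    · -- answer 1: (e, 1) is already in the queue
      have hex : e - s = 1 ∨ e - s = -1 ∨ e - s = 5 := (gG_eq_one _).mp hD
      rw [← List.append_nil [(s + 1, (1:Int)), (s - 1, 1), (s + 5, 1)]]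
      refine phase2 e (gG (e - s)) _ [] _ f ?_ ?_ ?_
      · rcases hex with h | h | h
        · exact hfit 1 (by norm_num) h
        · exact hfit (-1) (by norm_num) h
        · exact hfit 5 (by norm_num) h
      · intro pj h
        simp only [List.mem_cons] at h
        rcases h with rfl | rfl | rfl | h
        · simp [hD]
        · simp [hD]
        · simp [hD]
        · simp at h
      · simp only [List.length_cons, List.length_nil]
        omega
    · -- answer ≥ 2: run the level machine from level 1
      have hD2 : 2 ≤ gG (e - s) := by omega
      rw [← List.append_nil [(s + 1, (1:Int)), (s - 1, 1), (s + 5, 1)]]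
      refine phase1 s e (gG (e - s)) rfl ((gG (e - s) - 1).toNat + f) f 1 _ [] _ rfl
        (by omega) (by omega) ⟨?_, by simp, ?_, ?_, ?_, ?_⟩ ?_
      · intro pj h
        simp only [List.mem_cons] at h
        rcases h with rfl | rfl | rfl | h
        · rfl
        · rfl
        · rfl
        · simp at h
      · intro pj h
        simp only [List.append_nil, List.mem_cons] at h
        rcases h with rfl | rfl | rfl | h
        · have hr : s + 1 - s = (1 : Int) := by ring
          simp only [hr]; decide
        · have hr : s - 1 - s = (-1 : Int) := by ring
          simp only [hr]; decide
        · have hr : s + 5 - s = (5 : Int) := by ring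
          simp only [hr]; decide
        · simp at h
      · intro x hx hle
        have hg0 : gG (x - s) ≠ 0 := by
          rw [Ne, gG_eq_zero]; omega
        have hgpos := gG_nonneg (x - s)
        by_cases hone : gG (x - s) = 1
        · have hxs := (gG_eq_one _).mp hone
          left
          rcases hxs with h | h | h <;> rw [hmemV] <;> omega
        · have h2 : gG (x - s) = 2 := by omega
          obtain ⟨m, hm, hgm⟩ := gG_pred (x - s) (by omega)
          have hin : x - m - s = 1 ∨ x - m - s = -1 ∨ x - m - s = 5 := by
            have h1' : gG ((x - s) - m) = 1 := by omega
            have h2' := (gG_eq_one _).mp h1'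
            rcases h2' with h | h | h <;> omega
          right
          refine ⟨(x - m, 1), ?_, ?_⟩
          · rcases hin with h | h | h <;> simp only [List.mem_cons, List.not_mem_nil, or_false, Prod.mk.injEq, and_true] <;> omega
          · rcases hm with rfl | rfl | rfl
            · exact Or.inl (by omega)
            · exact Or.inr (Or.inl (by omega))
            · exact Or.inr (Or.inr (by omega))
      · intro y hy
        rw [hmemV] at hy
        left
        refine ⟨1, ?_⟩
        rcases hy with rfl | rfl | rfl <;> simp
      · intro heV
        exfalso
        rw [hmemV] at heV
        have h1 : gG (e - s) = 1 := (gG_eq_one _).mpr (by rcases heV with h | h | h <;> omega)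
        omega
      · -- initial fuel bound
        simp only [List.length_cons, List.length_nil]
        have hQle : 4 ^ (gG (e - s) - 1).toNat ≤ 4 ^ (e - s).natAbs :=
          Nat.pow_le_pow_right (by norm_num) (by omega)
        have hQ1 : 0 < 4 ^ (gG (e - s) - 1).toNat := pow_pos (by norm_num) _
        have hsplit : 4 ^ ((e - s).natAbs + 2) = 4 ^ (e - s).natAbs * 16 := by
          rw [pow_add]; norm_num
        omega

-- ===== VERDICT (by name: the statement is the Claim_ definition above) =====
theorem bfs_spec : Claim_equal_bfs := by
  intro s e _
  unfold Spec_bfs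
  rw [bfs_eq_gG, bfs_alt_eq]
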